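-- pv_equiv track=rewrite | github.com/ookok/LivingTreeAlAgent | localresources/LivingTreeAlAgent/core/karpathy_skills/skill_configs.py | _find_duplicate_code
-- ===== SOURCE A (Python) =====
-- def _find_duplicate_code(code: str) -> bool:
--     """查找重复代码"""
--     lines = code.split('\n')
--     line_counts = {}
--
--     for line in lines:
--         line = line.strip()
--         if line and not line.startswith('#'):
--             line_counts[line] = line_counts.get(line, 0) + 1
--
--     return any(count > 3 for count in line_counts.values())
-- ===== SOURCE B (Python) =====
-- def _find_duplicate_code(code: str) -> bool:
--     """查找重复代码 (sort-then-scan: identical lines become adjacent, look for a run longer than 3)"""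
--     stripped = [line.strip() for line in code.split('\n')]
--     kept = sorted(line for line in stripped if line and not line.startswith('#'))
--     prev = None
--     run = 0
--     for line in kept:
--         run = run + 1 if line == prev else 1
--         prev = line
--         if run > 3:
--             return True
--     return False
-- ===== Notes on version B (the rewrite author's own statement) =====
-- stated objective: alternative
-- what changed: Replaces the dict frequency counter with sort-then-scan: the kept stripped lines are sorted so equal lines are adjacent, then one pass tracks the current run length and returns True as soon as a run exceeds 3.
import Mathlib
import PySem

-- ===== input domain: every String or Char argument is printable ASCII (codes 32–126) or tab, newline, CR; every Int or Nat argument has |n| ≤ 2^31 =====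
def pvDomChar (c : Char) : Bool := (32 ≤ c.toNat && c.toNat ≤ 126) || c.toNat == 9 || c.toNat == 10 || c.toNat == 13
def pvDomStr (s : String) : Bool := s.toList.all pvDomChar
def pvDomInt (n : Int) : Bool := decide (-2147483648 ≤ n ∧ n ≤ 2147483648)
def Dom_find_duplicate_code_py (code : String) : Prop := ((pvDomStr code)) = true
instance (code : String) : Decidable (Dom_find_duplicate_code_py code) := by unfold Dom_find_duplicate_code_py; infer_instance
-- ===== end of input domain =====

-- B replaces A's dict frequency counter with sort-then-scan for a run longer than 3 (objective: alternative).

-- ===== PORT A =====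
def find_duplicate_code_py (code : String) : Bool :=
  let lines := (PySem.Str.split? code "\n").getD []   -- sep "\n" ≠ "", so split? is always some
  let line_counts : PySem.Dict String Int :=
    lines.foldl (fun d line =>
      let line := PySem.Str.strip line
      if line ≠ "" ∧ ¬ (PySem.Str.startswith line "#" = true) then
        d.insert line (d.getD line 0 + 1)
      else d) PySem.Dict.empty
  line_counts.values.any (fun count => decide (count > 3))

-- ===== PORT B =====
-- the early-return loop of Source B: run-length scan, True as soon as a run exceeds 3
def pvScanRuns : Option String → Nat → List String → Bool
  | _, _, [] => false
  | prev, run, line :: rest =>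
    let run' := if some line == prev then run + 1 else 1
    if run' > 3 then true else pvScanRuns (some line) run' rest

def find_duplicate_code_py_alt (code : String) : Bool :=
  let stripped := ((PySem.Str.split? code "\n").getD []).map PySem.Str.strip
  let kept := PySem.List.sorted
    (stripped.filter (fun line => line ≠ "" && !(PySem.Str.startswith line "#")))
    (fun x => x) false
  pvScanRuns none 0 kept

-- ===== PRECONDITION & SPEC =====
def Spec_find_duplicate_code_py (code : String) (out : Bool) : Prop := out = find_duplicate_code_py_alt code
instance (code : String) (out : Bool) : Decidable (Spec_find_duplicate_code_py code out) := by unfold Spec_find_duplicate_code_py; infer_instance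

-- ===== CLAIM (what is proved, stated in full; the proofs are below) =====
def Claim_equal_find_duplicate_code_py : Prop := ∀ (code : String), Dom_find_duplicate_code_py code → Spec_find_duplicate_code_py code (find_duplicate_code_py code)

-- ===== LEMMAS AND PROOFS =====

-- the keep predicate both programs apply to a stripped line
def pvKeep (l : String) : Bool := l ≠ "" && !(PySem.Str.startswith l "#")

lemma pvKeep_eq_true (l : String) :
    pvKeep l = true ↔ (l ≠ "" ∧ ¬ (PySem.Str.startswith l "#" = true)) := by
  simp [pvKeep]

-- A's loop = the plain counting loop over the filtered stripped lines
lemma pvFoldA_eq (lines : List String) (d : PySem.Dict String Int) :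
    lines.foldl (fun d line =>
      let line := PySem.Str.strip line
      if line ≠ "" ∧ ¬ (PySem.Str.startswith line "#" = true) then
        d.insert line (d.getD line 0 + 1)
      else d) d
    = ((lines.map PySem.Str.strip).filter pvKeep).foldl
        (fun d x => d.insert x (d.getD x 0 + 1)) d := by
  induction lines generalizing d with
  | nil => rfl
  | cons a t ih =>
    simp only [List.foldl_cons, List.map_cons, List.filter_cons]
    by_cases h : PySem.Str.strip a ≠ "" ∧ ¬ (PySem.Str.startswith (PySem.Str.strip a) "#" = true)
    · rw [if_pos h, if_pos ((pvKeep_eq_true _).mpr h), List.foldl_cons]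
      exact ih _
    · rw [if_neg h, if_neg (fun hb => h ((pvKeep_eq_true _).mp hb))]
      exact ih _

-- A's result over the filtered list xs: some element occurs more than 3 times
lemma pvA_char (xs : List String) :
    ((xs.foldl (fun d x => d.insert x (d.getD x 0 + 1)) PySem.Dict.empty : PySem.Dict String Int).values.any
        (fun count => decide (count > 3)))
    = decide (∃ x ∈ xs, 3 < xs.count x) := by
  rw [PySem.Dict.foldl_insert_getD_add_one_eq_counter]
  have hv : (PySem.Dict.counter xs).values
      = ((PySem.Set.ofList xs).map (fun k => ((xs.count k : Int)))) := by
    have h := PySem.Dict.items_counter (xs := xs)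
    simp only [PySem.Dict.values, h, List.map_map]
    rfl
  rw [hv]
  rcases Bool.eq_false_or_eq_true (((PySem.Set.ofList xs).map (fun k => ((xs.count k : Int)))).any (fun count => decide (count > 3))) with h | h
  swap
  · rw [h]
    rw [List.any_eq_false] at h
    symm
    rw [decide_eq_false_iff_not]
    rintro ⟨x, hx, hc⟩
    have hmem : x ∈ PySem.Set.ofList xs := (PySem.Set.mem_ofList xs x).mpr hx
    have := h _ (List.mem_map_of_mem hmem)
    simp at this
    omega
  · rw [h]
    rw [List.any_eq_true] at h
    obtain ⟨c, hc, hgt⟩ := h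
    obtain ⟨x, hx, rfl⟩ := List.mem_map.mp hc
    symm
    rw [decide_eq_true_iff]
    refine ⟨x, (PySem.Set.mem_ofList xs x).mp hx, ?_⟩
    simp at hgt
    omega

-- the run scan on the tail of a sorted list: invariant
lemma pvScan_some (ys : List String) :
    ∀ (p : String) (r : Nat), r ≤ 3 →
    (p :: ys).Pairwise (· ≤ ·) →
    pvScanRuns (some p) r ys
      = decide (3 < r + ys.count p ∨ ∃ x ∈ ys, x ≠ p ∧ 3 < ys.count x) := by
  induction ys with
  | nil => intro p r hr _; simp [pvScanRuns]; omega
  | cons l rest ih =>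
    intro p r hr hpw
    have hple : p ≤ l := (List.pairwise_cons.mp hpw).1 _ (List.mem_cons_self ..)
    have hrest : (l :: rest).Pairwise (· ≤ ·) := (List.pairwise_cons.mp hpw).2
    by_cases hlp : l = p
    · subst hlp
      have hcount : (l :: rest).count l = rest.count l + 1 := by
        simp [List.count_cons_self]
      by_cases hbig : r + 1 > 3
      · have hL : pvScanRuns (some l) r (l :: rest) = true := by
          simp only [pvScanRuns, beq_self_eq_true]
          simp [hbig]
        rw [hL]
        symm
        rw [decide_eq_true_iff]
        left
        omega
      · have hL : pvScanRuns (some l) r (l :: rest) = pvScanRuns (some l) (r + 1) rest := by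
          simp only [pvScanRuns, beq_self_eq_true]
          simp [hbig]
        rw [hL, ih l (r + 1) (by omega) hrest]
        rw [decide_eq_decide]
        constructor
        · rintro (h | ⟨x, hx, hne, hc⟩)
          · left; omega
          · right
            exact ⟨x, List.mem_cons_of_mem _ hx, hne, by rwa [List.count_cons_of_ne (Ne.symm hne)]⟩
        · rintro (h | ⟨x, hx, hne, hc⟩)
          · left; omega
          · rcases List.mem_cons.mp hx with rfl | hx'
            · exact absurd rfl hne
            · right; exact ⟨x, hx', hne, by rwa [List.count_cons_of_ne (Ne.symm hne)] at hc⟩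
    · have hplt : p < l := lt_of_le_of_ne hple (fun h => hlp h.symm)
      have hallge : ∀ x ∈ l :: rest, l ≤ x := by
        intro x hx
        rcases List.mem_cons.mp hx with rfl | hx'
        · exact le_refl x
        · exact (List.pairwise_cons.mp hrest).1 _ hx'
      have hnp : ∀ x ∈ l :: rest, x ≠ p := by
        intro x hx h
        exact absurd (h ▸ hallge x hx) (not_le.mpr hplt)
      have hbeq : (some l == some p) = false := by
        simp [hlp]
      have hL : pvScanRuns (some p) r (l :: rest) = pvScanRuns (some l) 1 rest := by
        simp only [pvScanRuns, hbeq]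
        simp
      rw [hL, ih l 1 (by omega) hrest]
      rw [decide_eq_decide]
      have hcl : (l :: rest).count l = rest.count l + 1 := by simp [List.count_cons_self]
      have hcp : (l :: rest).count p = 0 := by
        rw [List.count_eq_zero]
        intro hmem; exact hnp p hmem rfl
      constructor
      · rintro (h | ⟨x, hx, hne, hc⟩)
        · right
          exact ⟨l, List.mem_cons_self .., hnp l (List.mem_cons_self ..), by omega⟩
        · right
          refine ⟨x, List.mem_cons_of_mem _ hx, hnp x (List.mem_cons_of_mem _ hx), ?_⟩
          by_cases hxl : x = l
          · subst hxl; omega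
          · rwa [List.count_cons_of_ne (Ne.symm hxl)]
      · rintro (h | ⟨x, hx, hne, hc⟩)
        · omega
        · rcases List.mem_cons.mp hx with rfl | hx'
          · left; omega
          · by_cases hxl : x = l
            · subst hxl; left; omega
            · right
              exact ⟨x, hx', hxl, by rwa [List.count_cons_of_ne (Ne.symm hxl)] at hc⟩

-- the run scan from the initial state, on a sorted list
lemma pvScan_char (ys : List String) (hpw : ys.Pairwise (· ≤ ·)) :
    pvScanRuns none 0 ys = decide (∃ x ∈ ys, 3 < ys.count x) := by
  cases ys with
  | nil => simp [pvScanRuns]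
  | cons a t =>
    have hL : pvScanRuns none 0 (a :: t) = pvScanRuns (some a) 1 t := by
      simp [pvScanRuns]
    rw [hL, pvScan_some t a 1 (by omega) hpw]
    rw [decide_eq_decide]
    have hca : (a :: t).count a = t.count a + 1 := by simp [List.count_cons_self]
    constructor
    · rintro (h | ⟨x, hx, hne, hc⟩)
      · exact ⟨a, List.mem_cons_self .., by omega⟩
      · exact ⟨x, List.mem_cons_of_mem _ hx, by rwa [List.count_cons_of_ne (Ne.symm hne)]⟩
    · rintro ⟨x, hx, hc⟩
      rcases List.mem_cons.mp hx with rfl | hx'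
      · left; omega
      · by_cases hxa : x = a
        · subst hxa; left; omega
        · right
          exact ⟨x, hx', hxa, by rwa [List.count_cons_of_ne (Ne.symm hxa)] at hc⟩

-- ===== VERDICT (by name: the statement is the Claim_ definition above) =====
theorem find_duplicate_code_py_spec : Claim_equal_find_duplicate_code_py := by
  intro code _
  unfold Spec_find_duplicate_code_py find_duplicate_code_py find_duplicate_code_py_alt
  simp only
  rw [pvFoldA_eq, pvA_char]
  set xs := (((PySem.Str.split? code "\n").getD []).map PySem.Str.strip).filter pvKeep with hxs
  have hfilter : (((PySem.Str.split? code "\n").getD []).map PySem.Str.strip).filter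
      (fun line => line ≠ "" && !(PySem.Str.startswith line "#")) = xs := rfl
  rw [hfilter]
  set ys := PySem.List.sorted xs (fun x => x) false with hys
  have hperm : ys.Perm xs := PySem.List.sorted_perm ..
  have hpw : ys.Pairwise (· ≤ ·) := PySem.List.sorted_pairwise ..
  rw [pvScan_char ys hpw]
  rw [decide_eq_decide]
  constructor
  · rintro ⟨x, hx, hc⟩
    exact ⟨x, hperm.mem_iff.mpr hx, by rwa [hperm.count_eq x]⟩
  · rintro ⟨x, hx, hc⟩
    exact ⟨x, hperm.mem_iff.mp hx, by rwa [← hperm.count_eq x]⟩
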